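-- pv_equiv track=rewrite | github.com/tomsontomno/Wizz | src/rating_routes.py | get_valid_routes
-- ===== SOURCE A (Python) =====
-- def get_valid_routes(routes, forbidden_cities, forbidden_routes):
--     """
--     Checks which of the given routes are restricted based on city and route restrictions.
--     The function checks if any part of the given route matches the forbidden routes or cities.
--
--     Args:
--         routes (list): A list representing the routes, each represented by a list of their cities.
--         forbidden_cities (list): A list of cities that are restricted.
--         forbidden_routes (list): A list of routes (lists of cities) that are restricted.
--
--     Returns:
--         list: A list of all valid routes, that are not restricted.
--     """
--     valid_routes_city = []
--     valid_routes_total = []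
--
--     allowed = True
--     for route in routes:
--         for city in forbidden_cities:
--             if city in route:
--                 allowed = False
--                 break
--         if allowed:
--             valid_routes_city.append(route)
--         else:
--             allowed = True
--
--     for route in valid_routes_city:
--         for i in range(len(route)):
--             for j in range(i + 1, len(route) + 1):
--                 sub_route = route[i:j]
--                 if sub_route in forbidden_routes:
--                     allowed = False
--                     break
--             if not allowed:
--                 break
--         if allowed:
--             valid_routes_total.append(route)
--         else:
--             allowed = True
--
--     return valid_routes_total
-- ===== SOURCE B (Python) =====
-- def get_valid_routes(routes, forbidden_cities, forbidden_routes):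
--     """Same result as A, but with hashed lookups: forbidden cities become a set,
--     forbidden routes a set of tuples grouped by the lengths that occur, and each
--     route is checked by sliding windows of exactly those lengths."""
--     fc = set(forbidden_cities)
--     frs = {tuple(r) for r in forbidden_routes if r}
--     lengths = {len(r) for r in frs}
--
--     def ok(route):
--         if any(c in fc for c in route):
--             return False
--         return not any(
--             tuple(route[k:k + L]) in frs
--             for L in lengths if L <= len(route)
--             for k in range(len(route) - L + 1)
--         )
--
--     return [route for route in routes if ok(route)]
-- ===== Notes on version B (the rewrite author's own statement) =====
-- stated objective: faster
-- what changed: A scans every (i,j) subslice of each route and linearly searches the forbidden lists; B builds a set of forbidden cities, a set of forbidden route tuples and the set of their lengths, and slides windows of exactly those lengths with O(1) hashed lookups.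
import Mathlib
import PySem

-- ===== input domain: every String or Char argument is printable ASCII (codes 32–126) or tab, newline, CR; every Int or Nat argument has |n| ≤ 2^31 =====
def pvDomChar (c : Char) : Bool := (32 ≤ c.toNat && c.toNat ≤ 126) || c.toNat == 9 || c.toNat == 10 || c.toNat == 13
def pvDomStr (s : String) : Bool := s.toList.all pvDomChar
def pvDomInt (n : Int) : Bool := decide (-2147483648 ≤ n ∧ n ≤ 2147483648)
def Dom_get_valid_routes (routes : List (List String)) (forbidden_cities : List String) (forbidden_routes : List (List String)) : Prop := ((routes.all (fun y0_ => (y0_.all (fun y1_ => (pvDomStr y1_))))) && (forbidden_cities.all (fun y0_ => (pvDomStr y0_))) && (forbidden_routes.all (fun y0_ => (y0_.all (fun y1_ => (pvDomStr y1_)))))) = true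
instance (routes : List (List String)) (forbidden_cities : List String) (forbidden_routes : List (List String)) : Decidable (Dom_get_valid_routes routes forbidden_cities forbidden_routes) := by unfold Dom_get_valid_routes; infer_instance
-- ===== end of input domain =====

-- B replaces A's list scans by hashed lookups: a set of forbidden cities, a set of
-- forbidden route tuples and the set of their lengths, sliding windows of exactly
-- those lengths over each route (objective: faster, asymptotic).


-- ===== PORT A =====
-- inner 'for city in forbidden_cities: if city in route: allowed = False; break'
def aCityLoop (route : List String) : List String → Bool → Bool
  | [], allowed => allowed
  | c :: cs, allowed => if route.contains c then false else aCityLoop route cs allowed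

-- inner 'for j in range(i+1, len(route)+1): sub_route = route[i:j]; if sub_route in forbidden_routes: allowed = False; break'
def aJLoop (route : List String) (forbidden_routes : List (List String)) (i : Int) : List Int → Bool → Bool
  | [], allowed => allowed
  | j :: js, allowed =>
      if forbidden_routes.contains (PySem.List.slice route (some i) (some j)) then false
      else aJLoop route forbidden_routes i js allowed

-- 'for i in range(len(route)): …; if not allowed: break'
def aILoop (route : List String) (forbidden_routes : List (List String)) : List Int → Bool → Bool
  | [], allowed => allowed
  | i :: is_, allowed =>
      let a := aJLoop route forbidden_routes i
        (PySem.List.pyRange (i + 1) (PySem.List.len route + 1) 1) allowed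
      if !a then a else aILoop route forbidden_routes is_ a

def get_valid_routes (routes : List (List String)) (forbidden_cities : List String) (forbidden_routes : List (List String)) : List (List String) :=
  -- first loop: valid_routes_city, threading 'allowed'
  let s1 := routes.foldl (fun (s : List (List String) × Bool) route =>
      let allowed := aCityLoop route forbidden_cities s.2
      if allowed then (s.1 ++ [route], allowed) else (s.1, true)) ([], true)
  -- second loop: valid_routes_total
  let s2 := s1.1.foldl (fun (s : List (List String) × Bool) route =>
      let allowed := aILoop route forbidden_routes
        (PySem.List.pyRange 0 (PySem.List.len route) 1) s.2
      if allowed then (s.1 ++ [route], allowed) else (s.1, true)) ([], s1.2)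
  s2.1

-- ===== PORT B =====
def bOk (fc : PySem.Set String) (frs : PySem.Set (List String)) (lengths : PySem.Set Int) (route : List String) : Bool :=
  if route.any (fun c => PySem.Set.contains fc c) then false
  else
    !(lengths.any (fun L => decide (L ≤ PySem.List.len route) &&
        (PySem.List.pyRange 0 (PySem.List.len route - L + 1) 1).any (fun k =>
          PySem.Set.contains frs (PySem.List.slice route (some k) (some (k + L))))))

def get_valid_routes_alt (routes : List (List String)) (forbidden_cities : List String) (forbidden_routes : List (List String)) : List (List String) :=
  let fc := PySem.Set.ofList forbidden_cities
  let frs := PySem.Set.ofList (forbidden_routes.filter (fun r => !r.isEmpty))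
  let lengths := PySem.Set.ofList (frs.map (fun r => PySem.List.len r))
  routes.filter (bOk fc frs lengths)

-- ===== PRECONDITION & SPEC =====
def Spec_get_valid_routes (routes : List (List String)) (forbidden_cities : List String) (forbidden_routes : List (List String)) (out : List (List String)) : Prop := out = get_valid_routes_alt routes forbidden_cities forbidden_routes
instance (routes : List (List String)) (forbidden_cities : List String) (forbidden_routes : List (List String)) (out : List (List String)) : Decidable (Spec_get_valid_routes routes forbidden_cities forbidden_routes out) := by unfold Spec_get_valid_routes; infer_instance

-- ===== CLAIM (what is proved, stated in full; the proofs are below) =====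
def Claim_equal_get_valid_routes : Prop := ∀ (routes : List (List String)) (forbidden_cities : List String) (forbidden_routes : List (List String)), Dom_get_valid_routes routes forbidden_cities forbidden_routes → Spec_get_valid_routes routes forbidden_cities forbidden_routes (get_valid_routes routes forbidden_cities forbidden_routes)

-- ===== LEMMAS AND PROOFS =====

-- A's first append-or-reset loop, entered with allowed = true, is a filter.
theorem phase1_eq_filter (cities : List String) (l : List (List String)) (acc : List (List String)) :
    l.foldl (fun (s : List (List String) × Bool) route =>
      let allowed := aCityLoop route cities s.2
      if allowed then (s.1 ++ [route], allowed) else (s.1, true)) (acc, true)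
    = (acc ++ l.filter (fun r => aCityLoop r cities true), true) := by
  induction l generalizing acc with
  | nil => simp
  | cons x xs ih =>
    simp only [List.foldl_cons, List.filter_cons]
    by_cases h : aCityLoop x cities true = true
    · simp [h, ih]
    · simp only [Bool.not_eq_true] at h
      simp [h, ih]

-- A's second append-or-reset loop, entered with allowed = true, is a filter.
theorem phase2_eq_filter (fr : List (List String)) (l : List (List String)) (acc : List (List String)) :
    l.foldl (fun (s : List (List String) × Bool) route =>
      let allowed := aILoop route fr (PySem.List.pyRange 0 (PySem.List.len route) 1) s.2
      if allowed then (s.1 ++ [route], allowed) else (s.1, true)) (acc, true)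
    = (acc ++ l.filter (fun r => aILoop r fr (PySem.List.pyRange 0 (PySem.List.len r) 1) true), true) := by
  induction l generalizing acc with
  | nil => simp
  | cons x xs ih =>
    simp only [List.foldl_cons, List.filter_cons]
    by_cases h : aILoop x fr (PySem.List.pyRange 0 (PySem.List.len x) 1) true = true
    · rw [if_pos h, if_pos h, h]
      exact (ih (acc ++ [x])).trans (by simp)
    · rw [if_neg h, if_neg h]
      exact ih acc

theorem aCityLoop_true (route : List String) (cs : List String) :
    aCityLoop route cs true = !cs.any (fun c => route.contains c) := by
  induction cs with
  | nil => simp [aCityLoop]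
  | cons c cs ih => by_cases h : route.contains c <;> simp [aCityLoop, ih]

theorem aJLoop_true (route : List String) (fr : List (List String)) (i : Int) (js : List Int) :
    aJLoop route fr i js true
      = !js.any (fun j => fr.contains (PySem.List.slice route (some i) (some j))) := by
  induction js with
  | nil => simp [aJLoop]
  | cons j js ih =>
    by_cases h : fr.contains (PySem.List.slice route (some i) (some j)) <;> simp [aJLoop, ih]

theorem aILoop_true (route : List String) (fr : List (List String)) (is_ : List Int) :
    aILoop route fr is_ true
      = !is_.any (fun i => (PySem.List.pyRange (i + 1) (PySem.List.len route + 1) 1).any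
          (fun j => fr.contains (PySem.List.slice route (some i) (some j)))) := by
  induction is_ with
  | nil => simp [aILoop]
  | cons i is_ ih =>
    simp only [aILoop, aJLoop_true, Bool.not_not, List.any_cons]
    by_cases h : (PySem.List.pyRange (i + 1) (PySem.List.len route + 1) 1).any
        (fun j => fr.contains (PySem.List.slice route (some i) (some j))) = true
    · rw [if_pos h, h]; simp
    · rw [if_neg h]
      rw [Bool.not_eq_true] at h
      rw [h]
      simp only [Bool.not_false, Bool.false_or]
      rw [ih]

-- the heart: A's exhaustive (i, j) scan finds a hit iff B's per-length window scan does
theorem subscan_iff (route : List String) (fr : List (List String)) :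
    ((PySem.List.pyRange 0 (PySem.List.len route) 1).any
        (fun i => (PySem.List.pyRange (i + 1) (PySem.List.len route + 1) 1).any
          (fun j => fr.contains (PySem.List.slice route (some i) (some j)))) = true)
    ↔ (((PySem.Set.ofList ((PySem.Set.ofList (fr.filter (fun r => !r.isEmpty))).map
          (fun r => PySem.List.len r)) : PySem.Set Int).any
        (fun L => decide (L ≤ PySem.List.len route) &&
          (PySem.List.pyRange 0 (PySem.List.len route - L + 1) 1).any (fun k =>
            PySem.Set.contains (PySem.Set.ofList (fr.filter (fun r => !r.isEmpty)))
              (PySem.List.slice route (some k) (some (k + L)))))) = true) := by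
  constructor
  · intro h
    rw [List.any_eq_true] at h
    obtain ⟨i, hi, h⟩ := h
    rw [List.any_eq_true] at h
    obtain ⟨j, hj, h⟩ := h
    rw [PySem.List.mem_pyRange_one] at hi hj
    rw [List.contains_iff_mem] at h
    simp only [PySem.List.len_eq] at hi hj
    obtain ⟨i', rfl⟩ : ∃ k : ℕ, i = (k : Int) := ⟨i.toNat, by omega⟩
    obtain ⟨j', rfl⟩ : ∃ k : ℕ, j = (k : Int) := ⟨j.toNat, by omega⟩
    have hlen : (PySem.List.slice route (some (i' : Int)) (some (j' : Int))).length = j' - i' := by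
      rw [PySem.List.slice_natCast, List.length_take, List.length_drop]; omega
    have hne : PySem.List.slice route (some (i' : Int)) (some (j' : Int)) ≠ [] := by
      intro he; rw [he] at hlen; simp at hlen; omega
    rw [List.any_eq_true]
    refine ⟨((j' - i' : ℕ) : Int), ?_, ?_⟩
    · rw [PySem.Set.mem_ofList, List.mem_map]
      refine ⟨PySem.List.slice route (some (i' : Int)) (some (j' : Int)), ?_, ?_⟩
      · rw [PySem.Set.mem_ofList, List.mem_filter]
        exact ⟨h, by simp [hne]⟩
      · rw [PySem.List.len_eq, hlen]
    · rw [Bool.and_eq_true]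
      refine ⟨by simp only [PySem.List.len_eq, decide_eq_true_eq]; omega, ?_⟩
      rw [List.any_eq_true]
      refine ⟨(i' : Int), ?_, ?_⟩
      · rw [PySem.List.mem_pyRange_one]
        simp only [PySem.List.len_eq]
        omega
      · have harg : (i' : Int) + ((j' - i' : ℕ) : Int) = (j' : Int) := by omega
        rw [harg, PySem.Set.contains_iff, PySem.Set.mem_ofList, List.mem_filter]
        exact ⟨h, by simp [hne]⟩
  · intro h
    rw [List.any_eq_true] at h
    obtain ⟨L, hL, h⟩ := h
    rw [PySem.Set.mem_ofList, List.mem_map] at hL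
    obtain ⟨rr, hrr, rfl⟩ := hL
    rw [PySem.Set.mem_ofList, List.mem_filter] at hrr
    have hrne : rr ≠ [] := by simpa using hrr.2
    have hr1 : 1 ≤ rr.length := List.length_pos_of_ne_nil hrne
    rw [Bool.and_eq_true] at h
    obtain ⟨hLn, h⟩ := h
    rw [decide_eq_true_eq] at hLn
    rw [List.any_eq_true] at h
    obtain ⟨k, hk, h⟩ := h
    rw [PySem.List.mem_pyRange_one] at hk
    rw [PySem.Set.contains_iff, PySem.Set.mem_ofList, List.mem_filter] at h
    simp only [PySem.List.len_eq] at hLn hk ⊢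
    rw [List.any_eq_true]
    refine ⟨k, by rw [PySem.List.mem_pyRange_one]; omega, ?_⟩
    rw [List.any_eq_true]
    refine ⟨k + (rr.length : Int), ?_, ?_⟩
    · rw [PySem.List.mem_pyRange_one]; omega
    · rw [List.contains_iff_mem]; exact h.1
-- pointwise: A's two filter tests conjoined equal B's single test
theorem pred_eq (forbidden_cities : List String) (fr : List (List String)) (r : List String) :
    (aILoop r fr (PySem.List.pyRange 0 (PySem.List.len r) 1) true &&
      !forbidden_cities.any (fun c => r.contains c))
    = bOk (PySem.Set.ofList forbidden_cities)
        (PySem.Set.ofList (fr.filter (fun rt => !rt.isEmpty)))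
        (PySem.Set.ofList ((PySem.Set.ofList (fr.filter (fun rt => !rt.isEmpty))).map
          (fun rt => PySem.List.len rt))) r := by
  rw [aILoop_true]
  unfold bOk
  by_cases hc : (r.any (fun c => PySem.Set.contains (PySem.Set.ofList forbidden_cities) c)) = true
  · rw [if_pos hc]
    have hc' : forbidden_cities.any (fun c => r.contains c) = true := by
      simp only [List.any_eq_true, PySem.Set.contains_iff, PySem.Set.mem_ofList,
        List.contains_iff_mem] at hc ⊢
      tauto
    rw [hc']
    simp
  · rw [if_neg hc]
    rw [Bool.not_eq_true] at hc
    have hc' : forbidden_cities.any (fun c => r.contains c) = false := by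
      rw [← Bool.not_eq_true] at hc ⊢
      intro hx; apply hc
      simp only [List.any_eq_true, PySem.Set.contains_iff, PySem.Set.mem_ofList,
        List.contains_iff_mem] at hx ⊢
      tauto
    rw [hc']
    have hsub := subscan_iff r fr
    rw [← Bool.eq_iff_iff] at hsub
    rw [hsub]
    simp

-- ===== VERDICT (by name: the statement is the Claim_ definition above) =====
theorem get_valid_routes_spec : Claim_equal_get_valid_routes := by
  intro routes forbidden_cities forbidden_routes _
  unfold Spec_get_valid_routes get_valid_routes get_valid_routes_alt
  simp only [phase1_eq_filter, phase2_eq_filter, List.nil_append]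
  rw [List.filter_filter]
  apply List.filter_congr
  intro r _
  rw [aCityLoop_true]
  exact pred_eq forbidden_cities forbidden_routes r
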